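-- pv_equiv track=rewrite | github.com/moazzam-ali12/bid-generator | extract.py | keyword_window
-- ===== SOURCE A (Python) =====
-- from typing import List, Tuple, Iterable, Dict
--
-- def keyword_window(text: str, keywords: List[str], window_lines: int = 3, max_chars: int = 90_000) -> str:
--     """
--     Simple extraction: keep lines near any keyword. Reduces prompt size.
--     """
--     if not text.strip():
--         return ""
--
--     lines = text.splitlines()
--     hits = [False] * len(lines)
--
--     kws = [k.lower() for k in keywords if k.strip()]
--     for idx, line in enumerate(lines):
--         low = line.lower()
--         if any(k in low for k in kws):
--             start = max(0, idx - window_lines)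
--             end = min(len(lines), idx + window_lines + 1)
--             for j in range(start, end):
--                 hits[j] = True
--
--     kept = [ln for ln, h in zip(lines, hits) if h]
--     out = "\n".join(kept).strip()
--     if len(out) > max_chars:
--         out = out[:max_chars] + "\n...[TRUNCATED]..."
--     return out
-- ===== SOURCE B (Python) =====
-- def keyword_window(text, keywords, window_lines=3, max_chars=90_000):
--     """
--     Keep lines near any keyword, via two linear sweeps: a forward sweep
--     remembering the most recent hit index and a backward sweep remembering the
--     nearest upcoming hit index; a line is kept when either is within
--     window_lines.  No per-hit window expansion and no mutable hits array.
--     """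
--     if not text.strip():
--         return ""
--
--     lines = text.splitlines()
--     kws = [k.lower() for k in keywords if k.strip()]
--
--     def is_hit(ln):
--         low = ln.lower()
--         return any(k in low for k in kws)
--
--     keep_fwd = []
--     last = None
--     for i, ln in enumerate(lines):
--         if is_hit(ln):
--             last = i
--         keep_fwd.append(last is not None and i - last <= window_lines)
--
--     keep_bwd_rev = []
--     nxt = None
--     for i, ln in reversed(list(enumerate(lines))):
--         if is_hit(ln):
--             nxt = i
--         keep_bwd_rev.append(nxt is not None and nxt - i <= window_lines)
--
--     kept = [ln for ln, f, b in zip(lines, keep_fwd, reversed(keep_bwd_rev))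
--             if f or b]
--     out = "\n".join(kept).strip()
--     if len(out) > max_chars:
--         out = out[:max_chars] + "\n...[TRUNCATED]..."
--     return out
-- ===== Notes on version B (the rewrite author's own statement) =====
-- stated objective: alternative
-- what changed: Instead of expanding a window around every matching line into a mutable boolean array, B makes two linear sweeps that carry the most recent / nearest upcoming hit index and keeps a line when either is within window_lines.
import Mathlib
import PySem

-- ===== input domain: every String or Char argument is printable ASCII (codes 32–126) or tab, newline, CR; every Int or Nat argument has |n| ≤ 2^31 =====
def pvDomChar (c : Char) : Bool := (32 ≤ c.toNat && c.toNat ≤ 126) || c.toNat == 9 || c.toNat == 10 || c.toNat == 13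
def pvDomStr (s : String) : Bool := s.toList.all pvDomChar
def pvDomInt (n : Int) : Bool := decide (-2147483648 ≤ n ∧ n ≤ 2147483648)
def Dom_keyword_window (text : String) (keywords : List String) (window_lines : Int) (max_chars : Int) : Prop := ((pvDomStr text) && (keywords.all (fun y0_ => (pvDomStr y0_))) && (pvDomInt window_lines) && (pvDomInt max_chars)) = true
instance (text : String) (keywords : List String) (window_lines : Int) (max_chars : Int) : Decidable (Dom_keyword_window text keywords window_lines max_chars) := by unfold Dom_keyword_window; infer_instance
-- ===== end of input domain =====

-- B replaces A's per-hit window scatter-marking by two linear sweeps that carry the most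
-- recent / nearest upcoming hit index and keep a line when either is within window_lines.

-- ===== PORT A =====
-- literal transliteration of A: mark a boolean `hits` array outward around every matching line
def keyword_window (text : String) (keywords : List String) (window_lines : Int) (max_chars : Int) : String :=
  if PySem.Str.strip text = "" then ""
  else
    let lines := PySem.Str.splitlines text
    let hits : List Bool := List.replicate lines.length false
    let kws := (keywords.filter (fun k => PySem.Str.strip k != "")).map PySem.Str.lower
    let hits := (PySem.List.enumerate lines).foldl (fun hs p =>
      if kws.any (fun k => PySem.Str.isIn k (PySem.Str.lower p.2)) then
        -- hits[j] = True for j in range(max(0, idx - window_lines), min(len(lines), idx + window_lines + 1))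
        (PySem.List.pyRange (max 0 (p.1 - window_lines))
            (min (PySem.List.len lines) (p.1 + window_lines + 1))).foldl
          (fun l j => l.set j.toNat true) hs   -- j ≥ 0 here, so .toNat is exact
      else hs) hits
    let kept := ((lines.zip hits).filter (fun p => p.2)).map (fun p => p.1)
    let out := PySem.Str.strip (PySem.Str.join "\n" kept)
    if PySem.Str.len out > max_chars then
      PySem.Str.slice out none (some max_chars) ++ "\n...[TRUNCATED]..."
    else out

-- ===== PORT B =====
-- helper: Python's `opt is not None and <comparison of opt with i>`
def pvKeepOf (c : Int → Int → Bool) (lastOpt : Option Int) (i : Int) : Bool :=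
  match lastOpt with
  | some l => c l i
  | none => false

-- transliteration of Source B: forward sweep (last hit), backward sweep (next hit), keep if either near
def keyword_window_alt (text : String) (keywords : List String) (window_lines : Int) (max_chars : Int) : String :=
  if PySem.Str.strip text = "" then ""
  else
    let lines := PySem.Str.splitlines text
    let kws := (keywords.filter (fun k => PySem.Str.strip k != "")).map PySem.Str.lower
    let isHit := fun ln => kws.any (fun k => PySem.Str.isIn k (PySem.Str.lower ln))
    let fwd := (PySem.List.enumerate lines).foldl (fun st p =>
        let last := if isHit p.2 then some p.1 else st.1
        (last, st.2 ++ [pvKeepOf (fun l i => decide (i - l ≤ window_lines)) last p.1]))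
      ((none : Option Int), ([] : List Bool))
    let bwdRev := (PySem.List.enumerate lines).reverse.foldl (fun st p =>
        let nxt := if isHit p.2 then some p.1 else st.1
        (nxt, st.2 ++ [pvKeepOf (fun l i => decide (l - i ≤ window_lines)) nxt p.1]))
      ((none : Option Int), ([] : List Bool))
    let kept := ((((lines.zip fwd.2).zip bwdRev.2.reverse).filter
        (fun p => p.1.2 || p.2)).map (fun p => p.1.1))
    let out := PySem.Str.strip (PySem.Str.join "\n" kept)
    if PySem.Str.len out > max_chars then
      PySem.Str.slice out none (some max_chars) ++ "\n...[TRUNCATED]..."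
    else out

-- ===== PRECONDITION & SPEC =====
def Spec_keyword_window (text : String) (keywords : List String) (window_lines : Int) (max_chars : Int) (out : String) : Prop := out = keyword_window_alt text keywords window_lines max_chars
instance (text : String) (keywords : List String) (window_lines : Int) (max_chars : Int) (out : String) : Decidable (Spec_keyword_window text keywords window_lines max_chars out) := by unfold Spec_keyword_window; infer_instance

-- ===== CLAIM =====
def Claim_equal_keyword_window : Prop := ∀ (text : String) (keywords : List String) (window_lines : Int) (max_chars : Int), Dom_keyword_window text keywords window_lines max_chars → Spec_keyword_window text keywords window_lines max_chars (keyword_window text keywords window_lines max_chars)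

-- ===== LEMMAS AND PROOFS =====

-- ---- A-side characterization (boolean marking loop) ----

lemma mark_getElem? : ∀ (n : Nat) (a b : Int), 0 ≤ a → b - a ≤ n → ∀ (hs : List Bool) (k : Nat),
    ((PySem.List.pyRange a b).foldl (fun l j => l.set j.toNat true) hs)[k]? =
      if a ≤ (k : Int) ∧ (k : Int) < b then (if k < hs.length then some true else none) else hs[k]? := by
  intro n
  induction n with
  | zero =>
    intro a b ha hb hs k
    rw [PySem.List.pyRange_one_eq_nil (by omega)]
    simp only [List.foldl_nil]
    rw [if_neg (by omega)]
  | succ n ih =>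
    intro a b ha hb hs k
    by_cases hab : a < b
    · rw [PySem.List.pyRange_one_cons hab]
      simp only [List.foldl_cons]
      rw [ih (a + 1) b (by omega) (by omega), List.length_set, List.getElem?_set]
      have hat : (a.toNat : Int) = a := Int.toNat_of_nonneg ha
      split_ifs <;> first | rfl | omega
    · rw [PySem.List.pyRange_one_eq_nil (by omega)]
      simp only [List.foldl_nil]
      rw [if_neg (by omega)]

lemma length_foldl_set (js : List Int) (hs : List Bool) :
    (js.foldl (fun l j => l.set j.toNat true) hs).length = hs.length := by
  induction js generalizing hs with
  | nil => rfl
  | cons j js ih => simp [List.foldl_cons, ih]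

lemma loop_getElem? (m : String → Bool) (w n : Int) :
    ∀ (ps : List (Int × String)) (hs : List Bool) (k : Nat),
    (ps.foldl (fun hs p =>
        if m p.2 then
          (PySem.List.pyRange (max 0 (p.1 - w)) (min n (p.1 + w + 1))).foldl
            (fun l j => l.set j.toNat true) hs
        else hs) hs)[k]? =
      if ps.any (fun p => m p.2 && decide (p.1 - w ≤ (k : Int)) && decide ((k : Int) ≤ p.1 + w)
                    && decide ((k : Int) < n))
      then (if k < hs.length then some true else none) else hs[k]? := by
  intro ps
  induction ps with
  | nil => intro hs k; simp
  | cons p ps ih =>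
    intro hs k
    simp only [List.foldl_cons, List.any_cons]
    by_cases hm : m p.2 = true
    · rw [if_pos hm, ih, length_foldl_set,
        mark_getElem? ((min n (p.1 + w + 1)) - (max 0 (p.1 - w))).toNat _ _ (by omega) (by omega)]
      simp only [hm, Bool.true_and]
      cases htail : ps.any (fun p => m p.2 && decide (p.1 - w ≤ (k : Int)) && decide ((k : Int) ≤ p.1 + w)
                    && decide ((k : Int) < n)) <;>
        simp only [Bool.or_true, Bool.or_false, Bool.false_eq_true, Bool.and_eq_true,
          decide_eq_true_eq, if_false, if_true]
      split_ifs <;> first | rfl | omega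
    · rw [if_neg hm, ih]
      simp only [eq_false_of_ne_true hm, Bool.false_and, Bool.false_or]

-- ---- B-side machinery: a sweep carrying the most recently seen hit index ----

def pvPassFlags (m : String → Bool) (c : Int → Int → Bool) :
    List (Int × String) → Option Int → List Bool
  | [], _ => []
  | p :: t, lastOpt =>
      let l' := if m p.2 then some p.1 else lastOpt
      pvKeepOf c l' p.1 :: pvPassFlags m c t l'

lemma pvPassFlags_length (m : String → Bool) (c : Int → Int → Bool) :
    ∀ (ps : List (Int × String)) (lastOpt : Option Int),
      (pvPassFlags m c ps lastOpt).length = ps.length := by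
  intro ps
  induction ps with
  | nil => intro _; rfl
  | cons p t ih => intro lastOpt; simp [pvPassFlags, ih]

-- the sweep fold of the port computes pvPassFlags
lemma pass_snd (m : String → Bool) (c : Int → Int → Bool) :
    ∀ (ps : List (Int × String)) (lastOpt : Option Int) (acc : List Bool),
      (ps.foldl (fun st p =>
          let last := if m p.2 then some p.1 else st.1
          (last, st.2 ++ [pvKeepOf c last p.1])) (lastOpt, acc)).2
        = acc ++ pvPassFlags m c ps lastOpt := by
  intro ps
  induction ps with
  | nil => intro lastOpt acc; simp [pvPassFlags]
  | cons p t ih =>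
    intro lastOpt acc
    simp only [List.foldl_cons, pvPassFlags]
    rw [ih]
    simp

-- characterization of a sweep: a flag is set iff some already-seen hit is near,
-- provided later-seen hits are at least as near (hmono)
lemma passFlags_getElem? (m : String → Bool) (c : Int → Int → Bool) :
    ∀ (ps : List (Int × String)) (lastOpt : Option Int) (k : Nat) (hk : k < ps.length),
      (∀ (j1 j2 : Nat) (h1 : j1 < ps.length) (h2 : j2 < ps.length), j1 ≤ j2 → j2 ≤ k →
         c ps[j1].1 ps[k].1 = true → c ps[j2].1 ps[k].1 = true) →
      (pvPassFlags m c ps lastOpt)[k]? =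
        some ((ps.take (k+1)).any (fun p => m p.2 && c p.1 ps[k].1)
          || ((ps.take (k+1)).all (fun p => !m p.2) && pvKeepOf c lastOpt ps[k].1)) := by
  intro ps
  induction ps with
  | nil => intro _ k hk; simp at hk
  | cons p t ih =>
    intro lastOpt k hk hmono
    cases k with
    | zero =>
      simp only [pvPassFlags, List.getElem?_cons_zero, List.take_succ_cons, List.take_zero,
        List.any_cons, List.any_nil, List.all_cons, List.all_nil, List.getElem_cons_zero,
        Bool.or_false, Bool.and_true]
      by_cases hp : m p.2 = true <;> simp [hp, pvKeepOf]
    | succ k =>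
      have hk' : k < t.length := by simpa using hk
      have hmono' : ∀ (j1 j2 : Nat) (h1 : j1 < t.length) (h2 : j2 < t.length), j1 ≤ j2 → j2 ≤ k →
          c t[j1].1 t[k].1 = true → c t[j2].1 t[k].1 = true := by
        intro j1 j2 h1 h2 hle hlek hc
        have := hmono (j1+1) (j2+1) (by simpa using h1) (by simpa using h2)
          (by omega) (by omega)
        simpa using this hc
      simp only [pvPassFlags]
      rw [List.getElem?_cons_succ, ih _ k hk' hmono']
      simp only [List.getElem_cons_succ, List.take_succ_cons, List.any_cons, List.all_cons]
      by_cases hp : m p.2 = true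
      · simp only [hp, if_true, Bool.true_and, Bool.not_true, Bool.false_and, Option.some.injEq,
          pvKeepOf, Bool.or_false]
        -- E || (N && c p.1 t[k].1) = (c p.1 t[k].1 || E)
        cases hc : c p.1 t[k].1 with
        | false => simp
        | true =>
          simp only [Bool.and_true, Bool.true_or]
          cases hE : (t.take (k + 1)).any (fun q => m q.2 && c q.1 t[k].1) with
          | true => simp
          | false =>
            simp only [Bool.false_or]
            rw [List.all_eq_true]
            intro q hmem
            simp only [Bool.not_eq_eq_eq_not, Bool.not_true]
            by_contra hqb
            rw [Bool.not_eq_false] at hqb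
            obtain ⟨j0, hj0len, hj0⟩ := List.getElem_of_mem hmem
            have hj0t : j0 < t.length := by simp [List.length_take] at hj0len; omega
            have hj0k : j0 < k + 1 := by simp [List.length_take] at hj0len; omega
            have hj0' : t[j0] = q := by rw [← hj0, List.getElem_take]
            have hcq : c t[j0].1 t[k].1 = true := by
              have := hmono 0 (j0 + 1) (by simp) (by simpa using hj0t) (by omega) (by omega)
              simpa using this (by simpa using hc)
            rw [List.any_eq_false] at hE
            have hmem2 : t[j0] ∈ t.take (k + 1) := by rw [hj0']; exact hmem
            have := hE t[j0] hmem2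
            rw [hj0'] at hcq
            rw [hj0'] at this
            simp [hqb, hcq] at this
      · have hp' : m p.2 = false := by simpa using hp
        simp [hp', pvKeepOf]

-- any over a take, by index
lemma any_take_iff {α : Type} (l : List α) (n : Nat) (f : α → Bool) :
    (l.take n).any f = true ↔ ∃ (j : Nat) (hj : j < l.length), j < n ∧ f l[j] = true := by
  constructor
  · intro h
    rw [List.any_eq_true] at h
    obtain ⟨x, hxmem, hx⟩ := h
    obtain ⟨j, hjlen, hj⟩ := List.getElem_of_mem hxmem
    have h1 : j < l.length := by have := hjlen; simp [List.length_take] at this; omega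
    have h2 : j < n := by have := hjlen; simp [List.length_take] at this; omega
    rw [List.getElem_take] at hj
    exact ⟨j, h1, h2, by rw [hj]; exact hx⟩
  · intro ⟨j, hj, hjn, hf⟩
    rw [List.any_eq_true]
    have hlt : j < (l.take n).length := by simp [List.length_take]; omega
    refine ⟨(l.take n)[j], List.getElem_mem hlt, ?_⟩
    rw [List.getElem_take]
    exact hf

-- zip3 filter (B's kept) = zip filter over pointwise-or (for the comparison with A)
lemma zip3_filter : ∀ (ls : List String) (f b : List Bool),
    ((((ls.zip f).zip b).filter (fun p => p.1.2 || p.2)).map (fun p => p.1.1))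
      = ((ls.zip (f.zipWith (· || ·) b)).filter (fun p => p.2)).map (fun p => p.1) := by
  intro ls
  induction ls with
  | nil => intro f b; simp
  | cons x ls ih =>
    intro f b
    cases f with
    | nil => simp
    | cons fh ft =>
      cases b with
      | nil => simp
      | cons bh bt =>
        simp only [List.zip_cons_cons, List.zipWith_cons_cons, List.filter_cons]
        cases h : (fh || bh) <;> simp [ih]

-- two zip-filters over the same lines agree when the boolean lists agree pointwise
lemma zipfilter_congr : ∀ (ls : List String) (h1 h2 : List Bool),
    (∀ k, k < ls.length → h1[k]? = h2[k]?) →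
    ((ls.zip h1).filter (fun p => p.2)).map (fun p => p.1)
      = ((ls.zip h2).filter (fun p => p.2)).map (fun p => p.1) := by
  intro ls
  induction ls with
  | nil => intro h1 h2 _; simp
  | cons x ls ih =>
    intro h1 h2 hpt
    cases h1 with
    | nil =>
      cases h2 with
      | nil => rfl
      | cons b2 t2 => exact absurd (hpt 0 (by simp)) (by simp)
    | cons b1 t1 =>
      cases h2 with
      | nil => exact absurd (hpt 0 (by simp)) (by simp)
      | cons b2 t2 =>
        have h0 := hpt 0 (by simp)
        simp only [List.getElem?_cons_zero, Option.some.injEq] at h0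
        subst h0
        have := ih t1 t2 (fun k hk => by simpa using hpt (k+1) (by simp; omega))
        simp only [List.zip_cons_cons, List.filter_cons]
        cases b1 <;> simp [this]

-- pointwise: (forward near) || (backward near) = A's window condition, at index k
lemma flags_pointwise (m : String → Bool) (w : Int) (ls : List String) (k : Nat)
    (hk : k < ls.length) :
    ((pvPassFlags m (fun l i => decide (i - l ≤ w)) (PySem.List.enumerate ls) none).zipWith (· || ·)
      (pvPassFlags m (fun l i => decide (l - i ≤ w)) (PySem.List.enumerate ls).reverse none).reverse)[k]?
    = some ((PySem.List.enumerate ls).any (fun p => m p.2 && decide (p.1 - w ≤ (k : Int))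
        && decide ((k : Int) ≤ p.1 + w) && decide ((k : Int) < PySem.List.len ls))) := by
  have hlen : (PySem.List.enumerate ls).length = ls.length := by
    simp [PySem.List.length_enumerate]
  -- forward flag at k
  have hF := passFlags_getElem? m (fun l i => decide (i - l ≤ w)) (PySem.List.enumerate ls) none k
    (by omega) (by
      intro j1 j2 h1 h2 hle hlek hc
      rw [PySem.List.getElem_enumerate] at hc ⊢
      simp only [decide_eq_true_eq] at hc ⊢
      omega)
  -- backward flag: reverse index
  have hkrev : ls.length - 1 - k < (PySem.List.enumerate ls).reverse.length := by
    rw [List.length_reverse, hlen]; omega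
  have hB := passFlags_getElem? m (fun l i => decide (l - i ≤ w)) (PySem.List.enumerate ls).reverse
    none (ls.length - 1 - k) (by rw [List.length_reverse, hlen]; omega) (by
      intro j1 j2 h1 h2 hle hlek hc
      rw [List.getElem_reverse, List.getElem_reverse] at hc ⊢
      rw [PySem.List.getElem_enumerate] at hc ⊢
      simp only [decide_eq_true_eq] at hc ⊢
      simp only [hlen] at *
      omega)
  rw [List.getElem?_zipWith]
  rw [hF]
  rw [List.getElem?_reverse (by simp [pvPassFlags_length, hlen]; omega)]
  have hidx : (pvPassFlags m (fun l i => decide (l - i ≤ w)) (PySem.List.enumerate ls).reverse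
      none).length - 1 - k = ls.length - 1 - k := by
    simp [pvPassFlags_length, hlen]
  rw [hidx, hB]
  simp only [Option.some.injEq]
  -- now pure boolean/arithmetic equivalence
  have hgetF : (PySem.List.enumerate ls)[k] = ((k : Int), ls[k]'(by omega)) := by
    rw [PySem.List.getElem_enumerate]; simp
  have hgetB : (PySem.List.enumerate ls).reverse[ls.length - 1 - k]'hkrev
      = ((k : Int), ls[k]'hk) := by
    rw [List.getElem_reverse, PySem.List.getElem_enumerate]
    have hkk : (PySem.List.enumerate ls).length - 1 - (ls.length - 1 - k) = k := by
      rw [hlen]; omega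
    simp only [hkk]
    simp
  rw [hgetF, hgetB]
  simp only [pvKeepOf, Bool.and_false, Bool.or_false]
  rw [Bool.eq_iff_iff, Bool.or_eq_true, any_take_iff, any_take_iff, List.any_eq_true]
  constructor
  · rintro (⟨j, hj, hjk, hf⟩ | ⟨j, hj, hjk, hf⟩)
    · rw [PySem.List.getElem_enumerate] at hf
      simp only [Bool.and_eq_true, decide_eq_true_eq] at hf
      refine ⟨((j : Int), ls[j]'(by omega)), ?_, ?_⟩
      · rw [PySem.List.mem_enumerate_iff]
        exact ⟨j, by omega, by simp⟩
      · simp only [Bool.and_eq_true, decide_eq_true_eq, PySem.List.len]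
        have := hf.2
        refine ⟨⟨⟨hf.1, by omega⟩, by omega⟩, by push_cast; omega⟩
    · rw [List.getElem_reverse, PySem.List.getElem_enumerate] at hf
      simp only [Bool.and_eq_true, decide_eq_true_eq, hlen] at hf hj hjk ⊢
      refine ⟨((↑(ls.length - 1 - j) : Int), ls[ls.length - 1 - j]'(by omega)), ?_, ?_⟩
      · rw [PySem.List.mem_enumerate_iff]
        exact ⟨ls.length - 1 - j, by omega, by simp⟩
      · simp only [Bool.and_eq_true, decide_eq_true_eq, PySem.List.len]
        refine ⟨⟨⟨by simpa using hf.1, by omega⟩, by omega⟩, by push_cast; omega⟩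
  · rintro ⟨p, hpmem, hp⟩
    rw [PySem.List.mem_enumerate_iff] at hpmem
    obtain ⟨h, hh, rfl⟩ := hpmem
    simp only [Bool.and_eq_true, decide_eq_true_eq, PySem.List.len] at hp
    obtain ⟨⟨⟨hm, h1⟩, h2⟩, h3⟩ := hp
    by_cases hcase : h ≤ k
    · left
      refine ⟨h, by omega, by omega, ?_⟩
      rw [PySem.List.getElem_enumerate]
      simp only [Bool.and_eq_true, decide_eq_true_eq]
      exact ⟨by simpa using hm, by push_cast at h1 h2 ⊢; omega⟩
    · right
      refine ⟨ls.length - 1 - h, by simp [hlen]; omega, by omega, ?_⟩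
      rw [List.getElem_reverse, PySem.List.getElem_enumerate]
      have hidx2 : (PySem.List.enumerate ls).length - 1 - (ls.length - 1 - h) = h := by
        rw [hlen]; omega
      simp only [hidx2]
      simp only [Bool.and_eq_true, decide_eq_true_eq]
      exact ⟨by simpa using hm, by push_cast at h1 h2 ⊢; omega⟩

-- the two `kept` lists coincide
lemma kept_main (m : String → Bool) (lines : List String) (w : Int) :
    ((lines.zip ((PySem.List.enumerate lines).foldl (fun hs p =>
        if m p.2 then
          (PySem.List.pyRange (max 0 (p.1 - w))
              (min (PySem.List.len lines) (p.1 + w + 1))).foldl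
            (fun l j => l.set j.toNat true) hs
        else hs) (List.replicate lines.length false))).filter (fun p => p.2)).map (fun p => p.1)
    = (((lines.zip
        ((PySem.List.enumerate lines).foldl (fun st p =>
          let last := if m p.2 then some p.1 else st.1
          (last, st.2 ++ [pvKeepOf (fun l i => decide (i - l ≤ w)) last p.1]))
          ((none : Option Int), ([] : List Bool))).2).zip
        ((PySem.List.enumerate lines).reverse.foldl (fun st p =>
          let nxt := if m p.2 then some p.1 else st.1
          (nxt, st.2 ++ [pvKeepOf (fun l i => decide (l - i ≤ w)) nxt p.1]))
          ((none : Option Int), ([] : List Bool))).2.reverse).filter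
        (fun p => p.1.2 || p.2)).map (fun p => p.1.1) := by
  rw [pass_snd, pass_snd, List.nil_append, List.nil_append, zip3_filter]
  apply zipfilter_congr
  intro k hk
  rw [loop_getElem? m w (PySem.List.len lines) (PySem.List.enumerate lines) _ k,
    flags_pointwise m w lines k hk]
  rw [List.length_replicate]
  cases hA : (PySem.List.enumerate lines).any (fun p => m p.2 && decide (p.1 - w ≤ (k : Int))
      && decide ((k : Int) ≤ p.1 + w) && decide ((k : Int) < PySem.List.len lines)) with
  | true => rw [if_pos rfl, if_pos hk]
  | false => simp [hk]

-- ===== VERDICT =====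
theorem keyword_window_spec : Claim_equal_keyword_window := by
  intro text keywords window_lines max_chars _
  unfold Spec_keyword_window keyword_window keyword_window_alt
  by_cases hstrip : PySem.Str.strip text = ""
  · rw [if_pos hstrip, if_pos hstrip]
  · rw [if_neg hstrip, if_neg hstrip]
    exact congrArg (fun kept =>
      let out := PySem.Str.strip (PySem.Str.join "\n" kept)
      if PySem.Str.len out > max_chars then
        PySem.Str.slice out none (some max_chars) ++ "\n...[TRUNCATED]..."
      else out)
      (kept_main (fun ln => ((keywords.filter (fun k => PySem.Str.strip k != "")).map
          PySem.Str.lower).any (fun k => PySem.Str.isIn k (PySem.Str.lower ln)))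
        (PySem.Str.splitlines text) window_lines)
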